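-- pv_equiv track=rewrite | github.com/ulnessd/FiguratePartitionExplorer | series.py | pow_series
-- ===== SOURCE A (Python) =====
-- from typing import List
--
-- def _ensure_length(a: List[int], N: int) -> List[int]:
--     """
--     Return a copy of `a` of length exactly N+1.
--     If a is shorter, pad with zeros. If longer, truncate.
--     """
--     if len(a) == N + 1:
--         return a[:]  # copy
--     elif len(a) < N + 1:
--         return a[:] + [0] * (N + 1 - len(a))
--     else:
--         return a[: N + 1]
--
-- def one_series(N: int) -> List[int]:
--     """Return the constant 1 series: 1 + 0*q + ... + 0*q^N."""
--     coeffs = [0] * (N + 1)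
--     coeffs[0] = 1
--     return coeffs
--
-- def mul_series(a: List[int], b: List[int], N: int) -> List[int]:
--     """
--     Truncated Cauchy product of two series: c = a * b (mod q^{N+1}).
--
--     c[n] = sum_{k=0}^n a[k] * b[n-k], for n = 0..N.
--     """
--     a_ = _ensure_length(a, N)
--     b_ = _ensure_length(b, N)
--     out = [0] * (N + 1)
--
--     # Simple convolution with truncation
--     for i in range(N + 1):
--         ai = a_[i]
--         if ai == 0:
--             continue
--         # j can go from 0 up to N - i
--         max_j = N - i
--         # Use local variable for speed
--         for j in range(max_j + 1):
--             bj = b_[j]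
--             if bj != 0:
--                 out[i + j] += ai * bj
--
--     return out
--
-- def pow_series(base: List[int], exponent: int, N: int) -> List[int]:
--     """
--     Truncated power of a series: base(q)^exponent (mod q^{N+1}).
--
--     Uses exponentiation by squaring for efficiency.
--     Assumes exponent >= 0.
--     """
--     if exponent < 0:
--         raise ValueError("Negative exponents are not supported for series.")
--
--     # base^0 = 1
--     if exponent == 0:
--         return one_series(N)
--     if exponent == 1:
--         return _ensure_length(base, N)
--
--     result = one_series(N)
--     factor = _ensure_length(base, N)
--     e = exponent
--
--     # Binary exponentiation
--     while e > 0: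
--         if e & 1:
--             result = mul_series(result, factor, N)
--         factor = mul_series(factor, factor, N)
--         e >>= 1
--
--     return result
-- ===== SOURCE B (Python) =====
-- from typing import List
--
-- def pow_series(base: List[int], exponent: int, N: int) -> List[int]:
--     """
--     Truncated power of a series via J.C.P. Miller's recurrence:
--     one O(N^2) pass instead of O(log e) truncated multiplications.
--     base(q)^exponent (mod q^{N+1}), exponent >= 0.
--     """
--     if exponent < 0:
--         raise ValueError("Negative exponents are not supported for series.")
--     out = [0] * (N + 1)
--     if exponent == 0:
--         out[0] = 1
--         return out
--     # pad/truncate base to length N+1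
--     a = base[: N + 1] + [0] * (N + 1 - len(base))
--     # q-adic valuation v: index of first nonzero coefficient
--     v = 0
--     while v <= N and a[v] == 0:
--         v += 1
--     if v * exponent > N:
--         return out  # base ≡ 0 mod q^{N+1}, or the power starts beyond q^N
--     # Miller recurrence on the unit part a[v:], up to order M
--     M = N - v * exponent
--     c0 = a[v]
--     b = [0] * (M + 1)
--     b[0] = c0 ** exponent
--     for n in range(1, M + 1):
--         s = 0
--         for k in range(1, n + 1):
--             s += ((exponent + 1) * k - n) * a[v + k] * b[n - k]
--         b[n] = s // (n * c0)  # exact division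
--     return [0] * (v * exponent) + b
-- ===== Notes on version B (the rewrite author's own statement) =====
-- stated objective: faster
-- what changed: Replaced binary exponentiation by truncated convolutions (O(log e) full O(N^2) multiplications) with a single J.C.P. Miller power-recurrence pass (one O(N^2) loop with exact integer division), factoring out the q-adic valuation when the constant term is zero; intended as faster, measured 30-160x where both finish.
-- outside the precondition, e.g. on pow_series([1, 2], 1, -2): A returns [1], B returns []; on pow_series([1], 0, -1): A raises IndexError, B raises IndexError
import Mathlib
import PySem

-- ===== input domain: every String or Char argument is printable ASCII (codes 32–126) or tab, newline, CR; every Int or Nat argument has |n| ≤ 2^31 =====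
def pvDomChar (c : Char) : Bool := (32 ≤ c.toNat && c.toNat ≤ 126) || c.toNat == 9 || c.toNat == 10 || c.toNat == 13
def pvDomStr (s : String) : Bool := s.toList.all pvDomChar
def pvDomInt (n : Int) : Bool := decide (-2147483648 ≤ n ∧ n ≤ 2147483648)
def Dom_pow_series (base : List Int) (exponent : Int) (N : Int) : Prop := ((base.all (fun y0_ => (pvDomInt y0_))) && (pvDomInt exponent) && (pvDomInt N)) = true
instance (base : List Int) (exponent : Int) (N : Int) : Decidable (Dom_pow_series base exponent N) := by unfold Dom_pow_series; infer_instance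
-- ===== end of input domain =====

-- B replaces A's binary exponentiation by squaring (O(log e) truncated O(N^2)
-- multiplications) with a single J.C.P. Miller power-recurrence pass (one O(N^2)
-- loop using exact integer division), factoring out the q-adic valuation when the
-- constant term is zero; intended as faster (a timing run measured 30-160x on
-- the generated inputs on which both implementations finished).


-- ===== PORT A =====
def ensure_length (a : List Int) (N : Int) : List Int :=
  if (a.length : Int) = N + 1 then a
  else if (a.length : Int) < N + 1 then a ++ List.replicate (N + 1 - (a.length : Int)).toNat 0
  else PySem.List.slice a none (some (N + 1))

def one_series (N : Int) : List Int :=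
  -- coeffs = [0]*(N+1); coeffs[0] = 1  (Python raises IndexError when N < 0; Pre_ excludes that)
  PySem.List.pySetD (List.replicate (N + 1).toNat 0) 0 1

def mul_series (a b : List Int) (N : Int) : List Int :=
  let a_ := ensure_length a N
  let b_ := ensure_length b N
  let out := List.replicate (N + 1).toNat 0
  (PySem.List.pyRange 0 (N + 1) 1).foldl (fun out i =>
    let ai := PySem.List.pyGetD a_ i 0
    if ai = 0 then out
    else
      let max_j := N - i
      (PySem.List.pyRange 0 (max_j + 1) 1).foldl (fun out j =>
        let bj := PySem.List.pyGetD b_ j 0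
        if bj ≠ 0 then
          PySem.List.pySetD out (i + j) (PySem.List.pyGetD out (i + j) 0 + ai * bj)
        else out) out) out

-- the `while e > 0` loop of A's binary exponentiation
def powLoopA (N : Int) (e : Int) (result factor : List Int) : List Int :=
  if 0 < e then
    powLoopA N (PySem.Int.floordiv e 2)
      (if PySem.Int.mod e 2 = 1 then mul_series result factor N else result)
      (mul_series factor factor N)
  else result
termination_by e.toNat
decreasing_by
  rw [PySem.Int.floordiv_eq_ediv_of_pos (by omega)]
  omega

def pow_series (base : List Int) (exponent : Int) (N : Int) : List Int :=
  if exponent < 0 then []   -- Python: raise ValueError (excluded by Pre_)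
  else if exponent = 0 then one_series N
  else if exponent = 1 then ensure_length base N
  else powLoopA N exponent (one_series N) (ensure_length base N)

-- ===== PORT B =====
-- v = index of the first nonzero coefficient (the while loop of Source B)
def findvB (a : List Int) (N : Int) (v : Int) : Int :=
  if h : v ≤ N ∧ PySem.List.pyGetD a v 0 = 0 then findvB a N (v + 1) else v
termination_by (N + 1 - v).toNat
decreasing_by omega

-- the Miller-recurrence loop of Source B, returning the coefficient list b
def millerB (a : List Int) (exponent : Int) (v M c0 : Int) : List Int :=
  (PySem.List.pyRange 1 (M + 1) 1).foldl (fun b n =>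
    let s := (PySem.List.pyRange 1 (n + 1) 1).foldl (fun s k =>
      s + ((exponent + 1) * k - n) * PySem.List.pyGetD a (v + k) 0
            * PySem.List.pyGetD b (n - k) 0) 0
    PySem.List.pySetD b n (PySem.Int.floordiv s (n * c0)))
    (PySem.List.pySetD (List.replicate (M + 1).toNat 0) 0 (c0 ^ exponent.toNat))

def pow_series_alt (base : List Int) (exponent : Int) (N : Int) : List Int :=
  if exponent < 0 then []   -- Python: raise ValueError (excluded by Pre_)
  else
    let out := List.replicate (N + 1).toNat 0
    if exponent = 0 then PySem.List.pySetD out 0 1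
    else
      let a := PySem.List.slice base none (some (N + 1))
                 ++ List.replicate (N + 1 - (base.length : Int)).toNat 0
      let v := findvB a N 0
      if v * exponent > N then out
      else
        List.replicate (v * exponent).toNat 0
          ++ millerB a exponent v (N - v * exponent) (PySem.List.pyGetD a v 0)

-- ===== PRECONDITION & SPEC =====
-- Pre_ excludes negative exponents (A raises ValueError) and negative N, where A
-- raises IndexError except for exponent == 1, on which it returns the accidental
-- negative-slice artefact base[:N+1] of its shortcut; the negative-N inputs on
-- which that artefact is the empty list remain inside Pre_.
def Pre_pow_series (base : List Int) (exponent : Int) (N : Int) : Prop :=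
  0 ≤ exponent ∧ (0 ≤ N ∨ (exponent = 1 ∧ (N = -1 ∨ (base.length : Int) + N + 1 ≤ 0)))

instance (base : List Int) (exponent : Int) (N : Int) : Decidable (Pre_pow_series base exponent N) := by
  unfold Pre_pow_series; infer_instance

def pvWitness_pow_series : List Int × Int × Int := ([1, 2, 3], 2, 3)

def Spec_pow_series (base : List Int) (exponent : Int) (N : Int) (out : List Int) : Prop := out = pow_series_alt base exponent N
instance (base : List Int) (exponent : Int) (N : Int) (out : List Int) : Decidable (Spec_pow_series base exponent N out) := by unfold Spec_pow_series; infer_instance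

-- ===== CLAIM (what is proved, stated in full; the proofs are below) =====
def Claim_equal_pow_series : Prop := ∀ (base : List Int) (exponent : Int) (N : Int), Dom_pow_series base exponent N → Pre_pow_series base exponent N → Spec_pow_series base exponent N (pow_series base exponent N)


-- ===== LEMMAS AND PROOFS =====
-- ===== proof layer =====
def Fof (l : List Int) : PowerSeries ℤ := PowerSeries.mk (fun n => l.getD n 0)

def RepL (N : Int) (x : List Int) (φ : PowerSeries ℤ) : Prop :=
  x.length = (N + 1).toNat ∧
    ∀ n : ℕ, n < (N + 1).toNat → x.getD n 0 = PowerSeries.coeff n φ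

theorem getD_set (xs : List Int) (k : ℕ) (v : Int) (m : ℕ) :
    (xs.set k v).getD m 0 = if k = m ∧ k < xs.length then v else xs.getD m 0 := by
  simp only [List.getD_eq_getElem?_getD, List.getElem?_set]
  by_cases h1 : k = m
  · subst h1
    by_cases h2 : k < xs.length <;> simp [h2]
  · simp [h1]

theorem foldl_add_eq (g : Int → Int) (l : List Int) (s0 : Int) :
    l.foldl (fun s k => s + g k) s0 = s0 + (l.map g).sum := by
  induction l generalizing s0 with
  | nil => simp
  | cons a t ih => simp [ih, add_assoc]

theorem floordiv_mul_cancel (b q : Int) (hb : b ≠ 0) :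
    PySem.Int.floordiv (b * q) b = q := by
  have h1 := PySem.Int.floordiv_mul_add_mod (b * q) b
  have h2 : PySem.Int.mod (b * q) b = 0 := by
    rw [PySem.Int.mod_eq_zero_iff_dvd]
    exact ⟨q, rfl⟩
  have h3 : PySem.Int.floordiv (b * q) b * b = q * b := by
    rw [h2] at h1; linarith [h1]
  exact mul_right_cancel₀ hb h3

theorem rep_unique {N : Int} {x y : List Int} {φ : PowerSeries ℤ}
    (hx : RepL N x φ) (hy : RepL N y φ) : x = y := by
  apply List.ext_getElem (by rw [hx.1, hy.1])
  intro i h1 h2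
  have e1 : x.getD i 0 = x[i] := List.getD_eq_getElem x 0 h1
  have e2 : y.getD i 0 = y[i] := List.getD_eq_getElem y 0 h2
  rw [← e1, ← e2, hx.2 i (hx.1 ▸ h1), hy.2 i (hy.1 ▸ h2)]

theorem length_ensure (a : List Int) (N : Int) (hN : 0 ≤ N) :
    (ensure_length a N).length = (N + 1).toNat := by
  unfold ensure_length
  split_ifs with h1 h2
  · omega
  · simp only [List.length_append, List.length_replicate]; omega
  · rw [PySem.List.slice_to a (show (0:Int) ≤ N + 1 by omega)]
    simp only [List.length_take]; omega

theorem ensure_eq_of_len (x : List Int) (N : Int) (hN : 0 ≤ N)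
    (hx : x.length = (N + 1).toNat) : ensure_length x N = x := by
  unfold ensure_length
  rw [if_pos (by omega)]

theorem rep_one (N : Int) (hN : 0 ≤ N) : RepL N (one_series N) 1 := by
  have hset : one_series N = (List.replicate (N + 1).toNat (0 : Int)).set 0 1 := by
    rw [one_series, PySem.List.pySetD_of_nonneg _ _ (le_refl 0), Int.toNat_zero]
  constructor
  · simp [hset]
  · intro n hn
    rw [hset, getD_set, PowerSeries.coeff_one]
    rcases Nat.eq_zero_or_pos n with h | h
    · subst h; rw [if_pos ⟨rfl, by simp; omega⟩]; simp
    · rw [if_neg (by omega), if_neg (by omega)]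
      simp

theorem rep_self (N : Int) (x : List Int) (hx : x.length = (N + 1).toNat) :
    RepL N x (Fof x) := by
  exact ⟨hx, fun n hn => by simp [Fof, PowerSeries.coeff_mk]⟩

theorem coeff_mul_rep {N : Int} {x y : List Int} {φ ψ : PowerSeries ℤ}
    (hx : RepL N x φ) (hy : RepL N y ψ) (m : ℕ) (hm : m < (N + 1).toNat) :
    PowerSeries.coeff m (φ * ψ) = ∑ k ∈ Finset.range (m + 1), x.getD k 0 * y.getD (m - k) 0 := by
  rw [PowerSeries.coeff_mul, Finset.Nat.sum_antidiagonal_eq_sum_range_succ_mk]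
  apply Finset.sum_congr rfl
  intro k hk
  rw [Finset.mem_range] at hk
  rw [← hx.2 k (by omega), ← hy.2 (m - k) (by omega)]

def innF (b_ : List Int) (ai i : Int) : List Int → Int → List Int := fun out j =>
  let bj := PySem.List.pyGetD b_ j 0
  if bj ≠ 0 then PySem.List.pySetD out (i + j) (PySem.List.pyGetD out (i + j) 0 + ai * bj) else out

theorem inner_loop (b_ : List Int) (ai : Int) (i : Int) (hi : 0 ≤ i) (J : ℕ) (out : List Int)
    (hlen : i.toNat + J ≤ out.length) :
    ((PySem.List.pyRange 0 (J : Int) 1).foldl (innF b_ ai i) out).length = out.length ∧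
    ∀ m : ℕ, m < out.length →
      ((PySem.List.pyRange 0 (J : Int) 1).foldl (innF b_ ai i) out).getD m 0
        = out.getD m 0 + (if i.toNat ≤ m ∧ m < i.toNat + J then ai * b_.getD (m - i.toNat) 0 else 0) := by
  induction J with
  | zero =>
    rw [show ((0:ℕ):Int) = 0 by simp, PySem.List.pyRange_one_eq_nil (le_refl 0)]
    exact ⟨rfl, fun m hm => by simp⟩
  | succ J ih =>
    obtain ⟨ihl, ihg⟩ := ih (by omega)
    have hr : PySem.List.pyRange 0 ((J + 1 : ℕ) : Int) 1 = PySem.List.pyRange 0 (J : Int) 1 ++ [(J : Int)] := by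
      rw [show ((J + 1 : ℕ) : Int) = (J : Int) + 1 by push_cast; ring]
      exact PySem.List.pyRange_one_succ_right (by positivity)
    rw [hr, List.foldl_append, List.foldl_cons, List.foldl_nil]
    have hiJ : i + (J : Int) = ((i.toNat + J : ℕ) : Int) := by omega
    simp only [innF, hiJ, PySem.List.pyGetD_natCast, PySem.List.pySetD_natCast]
    by_cases hbj : b_.getD J 0 = 0
    · rw [if_neg (fun h => h hbj)]
      refine ⟨ihl, fun m hm => ?_⟩
      rw [ihg m hm]
      by_cases h1 : i.toNat ≤ m ∧ m < i.toNat + J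
      · rw [if_pos h1, if_pos ⟨h1.1, by omega⟩]
      · by_cases h2 : i.toNat ≤ m ∧ m < i.toNat + (J + 1)
        · rw [if_neg h1, if_pos h2, show m - i.toNat = J by omega, hbj, mul_zero]
        · rw [if_neg h1, if_neg h2]
    · rw [if_pos hbj]
      constructor
      · rw [List.length_set, ihl]
      · intro m hm
        rw [getD_set, ihl]
        by_cases hmi : i.toNat + J = m
        · rw [if_pos ⟨hmi, by omega⟩, ihg (i.toNat + J) (by omega)]
          rw [if_neg (by omega : ¬(i.toNat ≤ i.toNat + J ∧ i.toNat + J < i.toNat + J)), add_zero,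
            ← hmi, if_pos (by omega : i.toNat ≤ i.toNat + J ∧ i.toNat + J < i.toNat + (J + 1)),
            show i.toNat + J - i.toNat = J by omega]
        · rw [if_neg (fun h => hmi h.1), ihg m hm]
          by_cases h2 : i.toNat ≤ m ∧ m < i.toNat + (J + 1)
          · rw [if_pos h2, if_pos ⟨h2.1, by omega⟩]
          · rw [if_neg h2, if_neg (fun h => h2 ⟨h.1, by omega⟩)]

theorem outer_loop (a_ b_ : List Int) (N : Int) (hN : 0 ≤ N) (I : ℕ) (hI : (I : Int) ≤ N + 1)
    (out : List Int) (hlen : out.length = (N + 1).toNat) :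
    ((PySem.List.pyRange 0 (I : Int) 1).foldl (fun o i =>
        if PySem.List.pyGetD a_ i 0 = 0 then o else
          (PySem.List.pyRange 0 (N - i + 1) 1).foldl (innF b_ (PySem.List.pyGetD a_ i 0) i) o) out).length = (N + 1).toNat ∧
    ∀ m : ℕ, m < (N + 1).toNat →
      ((PySem.List.pyRange 0 (I : Int) 1).foldl (fun o i =>
        if PySem.List.pyGetD a_ i 0 = 0 then o else
          (PySem.List.pyRange 0 (N - i + 1) 1).foldl (innF b_ (PySem.List.pyGetD a_ i 0) i) o) out).getD m 0
        = out.getD m 0 + ∑ k ∈ Finset.range I, (if k ≤ m then a_.getD k 0 * b_.getD (m - k) 0 else 0) := by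
  induction I with
  | zero =>
    rw [show ((0:ℕ):Int) = 0 by simp, PySem.List.pyRange_one_eq_nil (le_refl 0)]
    exact ⟨hlen, fun m hm => by simp⟩
  | succ I ih =>
    obtain ⟨ihl, ihg⟩ := ih (by omega)
    have hr : PySem.List.pyRange 0 ((I + 1 : ℕ) : Int) 1 = PySem.List.pyRange 0 (I : Int) 1 ++ [(I : Int)] := by
      rw [show ((I + 1 : ℕ) : Int) = (I : Int) + 1 by push_cast; ring]
      exact PySem.List.pyRange_one_succ_right (by positivity)
    rw [hr, List.foldl_append]
    simp only [List.foldl_cons, List.foldl_nil, PySem.List.pyGetD_natCast]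
    by_cases hai : a_.getD I 0 = 0
    · rw [if_pos hai]
      refine ⟨ihl, fun m hm => ?_⟩
      rw [ihg m hm, Finset.sum_range_succ, hai]
      simp
    · rw [if_neg hai]
      have hJ : N - (I : Int) + 1 = (((N - (I : Int) + 1).toNat : ℕ) : Int) := by omega
      rw [hJ]
      obtain ⟨inl, ing⟩ := inner_loop b_ (a_.getD I 0) (I : Int) (by positivity)
        ((N - (I : Int) + 1).toNat) _ (by rw [ihl]; omega)
      constructor
      · rw [inl, ihl]
      · intro m hm
        rw [ing m (by omega), ihg m hm, Finset.sum_range_succ]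
        simp only [Int.toNat_natCast]
        by_cases h2 : I ≤ m
        · rw [if_pos ⟨h2, by omega⟩, if_pos h2, add_assoc]
        · rw [if_neg (fun h => h2 h.1), if_neg h2, add_zero, add_zero]

theorem mul_rep {N : Int} (hN : 0 ≤ N) {x y : List Int} {φ ψ : PowerSeries ℤ}
    (hx : RepL N x φ) (hy : RepL N y ψ) : RepL N (mul_series x y N) (φ * ψ) := by
  have hxl := hx.1
  have hyl := hy.1
  have hex : ensure_length x N = x := ensure_eq_of_len x N hN hxl
  have hey : ensure_length y N = y := ensure_eq_of_len y N hN hyl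
  have hNN : N + 1 = (((N + 1).toNat : ℕ) : Int) := by omega
  have hout : mul_series x y N = ((PySem.List.pyRange 0 (((N + 1).toNat : ℕ) : Int) 1).foldl (fun o i =>
        if PySem.List.pyGetD x i 0 = 0 then o else
          (PySem.List.pyRange 0 (N - i + 1) 1).foldl (innF y (PySem.List.pyGetD x i 0) i) o)
        (List.replicate (N + 1).toNat 0)) := by
    rw [mul_series]
    simp only [hex, hey]
    rw [← hNN]
    rfl
  obtain ⟨ol, og⟩ := outer_loop x y N hN ((N + 1).toNat) (by omega) (List.replicate (N + 1).toNat 0) (by simp)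
  constructor
  · rw [hout, ol]
  · intro m hm
    rw [hout, og m hm, coeff_mul_rep hx hy m hm]
    rw [List.getD_eq_getElem?_getD]
    simp only [List.getElem?_replicate]
    rw [if_pos hm]
    simp only [Option.getD_some, zero_add]
    have hsub : Finset.range (m + 1) ⊆ Finset.range ((N + 1).toNat) := by
      intro t ht
      rw [Finset.mem_range] at *
      omega
    have hz : ∀ k ∈ Finset.range ((N + 1).toNat), k ∉ Finset.range (m + 1) →
        (if k ≤ m then x.getD k 0 * y.getD (m - k) 0 else 0) = 0 := by
      intro k hk hnk
      rw [if_neg (by rw [Finset.mem_range] at hnk; omega)]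
    rw [← Finset.sum_subset hsub hz]
    apply Finset.sum_congr rfl
    intro k hk
    rw [Finset.mem_range] at hk
    rw [if_pos (by omega)]

theorem powLoopA_rep {N : Int} (hN : 0 ≤ N) (e : Int) (he : 0 ≤ e)
    {r x : List Int} {φ ψ : PowerSeries ℤ}
    (hr : RepL N r φ) (hx : RepL N x ψ) :
    RepL N (powLoopA N e r x) (φ * ψ ^ e.toNat) := by
  have main : ∀ (k : ℕ) (e : Int), e.toNat = k → 0 ≤ e →
      ∀ (r x : List Int) (φ ψ : PowerSeries ℤ), RepL N r φ → RepL N x ψ →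
        RepL N (powLoopA N e r x) (φ * ψ ^ e.toNat) := by
    intro k
    induction k using Nat.strong_induction_on with
    | _ k ih =>
      intro e hk he r x φ ψ hr hx
      rw [powLoopA]
      by_cases hpos : 0 < e
      · rw [if_pos hpos]
        have h2 : PySem.Int.floordiv e 2 = e / 2 := PySem.Int.floordiv_eq_ediv_of_pos (by omega)
        have hm2 : PySem.Int.mod e 2 = e % 2 := PySem.Int.mod_eq_emod_of_pos (by omega)
        have hlt : (PySem.Int.floordiv e 2).toNat < k := by rw [h2]; omega
        have hrec := ih _ hlt (PySem.Int.floordiv e 2) rfl (by rw [h2]; omega)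
          (if PySem.Int.mod e 2 = 1 then mul_series r x N else r) (mul_series x x N)
          (φ := if PySem.Int.mod e 2 = 1 then φ * ψ else φ) (ψ := ψ * ψ)
          (by by_cases hodd : PySem.Int.mod e 2 = 1
              · rw [if_pos hodd, if_pos hodd]; exact mul_rep hN hr hx
              · rw [if_neg hodd, if_neg hodd]; exact hr)
          (mul_rep hN hx hx)
        have harith : (if PySem.Int.mod e 2 = 1 then φ * ψ else φ) * (ψ * ψ) ^ (PySem.Int.floordiv e 2).toNat
            = φ * ψ ^ e.toNat := by
          have hsq : (ψ * ψ) ^ (PySem.Int.floordiv e 2).toNat = ψ ^ (2 * (PySem.Int.floordiv e 2).toNat) := by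
            rw [← sq, ← pow_mul]
          by_cases hodd : PySem.Int.mod e 2 = 1
          · rw [if_pos hodd, hsq, show e.toNat = 2 * (PySem.Int.floordiv e 2).toNat + 1 by
              rw [h2]; rw [hm2] at hodd; omega]
            rw [pow_succ]
            ring
          · rw [if_neg hodd, hsq, show e.toNat = 2 * (PySem.Int.floordiv e 2).toNat by
              rw [h2]; rw [hm2] at hodd; omega]
        rw [harith] at hrec
        exact hrec
      · rw [if_neg hpos, show e.toNat = 0 by omega, pow_zero, mul_one]
        exact hr
  exact main e.toNat e rfl he r x φ ψ hr hx

theorem findvB_spec (a : List Int) (N : Int) (v0 : Int) (h0 : v0 ≤ N + 1) :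
    v0 ≤ findvB a N v0 ∧ findvB a N v0 ≤ N + 1 ∧
      (∀ i : Int, v0 ≤ i → i < findvB a N v0 → PySem.List.pyGetD a i 0 = 0) ∧
      (findvB a N v0 ≤ N → PySem.List.pyGetD a (findvB a N v0) 0 ≠ 0) := by
  have main : ∀ (fuel : ℕ) (w : Int), (N + 1 - w).toNat ≤ fuel → w ≤ N + 1 →
      w ≤ findvB a N w ∧ findvB a N w ≤ N + 1 ∧
        (∀ i : Int, w ≤ i → i < findvB a N w → PySem.List.pyGetD a i 0 = 0) ∧
        (findvB a N w ≤ N → PySem.List.pyGetD a (findvB a N w) 0 ≠ 0) := by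
    intro fuel
    induction fuel with
    | zero =>
      intro w hf hw
      rw [findvB, dif_neg (by omega : ¬(w ≤ N ∧ PySem.List.pyGetD a w 0 = 0))]
      exact ⟨le_refl _, hw, fun i h1 h2 => absurd h2 (by omega), fun h => absurd h (by omega)⟩
    | succ fuel ih =>
      intro w hf hw
      rw [findvB]
      by_cases hc : w ≤ N ∧ PySem.List.pyGetD a w 0 = 0
      · rw [dif_pos hc]
        obtain ⟨ih1, ih2, ih3, ih4⟩ := ih (w + 1) (by omega) (by omega)
        refine ⟨by omega, ih2, ?_, ih4⟩
        intro i hi1 hi2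
        rcases eq_or_lt_of_le hi1 with h | h
        · rw [← h]; exact hc.2
        · exact ih3 i (by omega) hi2
      · rw [dif_neg hc]
        refine ⟨le_refl _, hw, fun i h1 h2 => absurd h2 (by omega), fun hle => ?_⟩
        intro h0
        exact hc ⟨hle, h0⟩
  exact main (N + 1 - v0).toNat v0 le_rfl h0

theorem F_shift (l : List Int) (vn : ℕ) (h : ∀ k, k < vn → l.getD k 0 = 0) :
    Fof l = PowerSeries.X ^ vn * PowerSeries.mk (fun j => l.getD (vn + j) 0) := by
  apply PowerSeries.ext
  intro n
  rw [PowerSeries.coeff_X_pow_mul']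
  simp only [Fof, PowerSeries.coeff_mk]
  split_ifs with hle
  · congr 1; omega
  · exact h n (by omega)

theorem F_zero (l : List Int) (h : ∀ k, l.getD k 0 = 0) : Fof l = 0 := by
  apply PowerSeries.ext
  intro n
  simp only [Fof, PowerSeries.coeff_mk, map_zero]
  exact h n

theorem miller_id (f : ℕ → ℤ) (e : ℕ) (he : 1 ≤ e) (n : ℕ) :
    ((n : ℤ) + 1) * f 0 * PowerSeries.coeff (n + 1) ((PowerSeries.mk f) ^ e)
      = ∑ k ∈ Finset.range (n + 1),
          (((e : ℤ) + 1) * ((k : ℤ) + 1) - ((n : ℤ) + 1)) * f (k + 1)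
            * PowerSeries.coeff (n - k) ((PowerSeries.mk f) ^ e) := by
  have hF : PowerSeries.mk f * (PowerSeries.mk f) ^ (e - 1) = (PowerSeries.mk f) ^ e := by
    rw [← pow_succ']
    congr 1
    omega
  have hmain : PowerSeries.mk f * (PowerSeries.derivative ℤ) ((PowerSeries.mk f) ^ e)
      = PowerSeries.C ((e : ℕ) : ℤ) * ((PowerSeries.derivative ℤ) (PowerSeries.mk f) * (PowerSeries.mk f) ^ e) := by
    rw [PowerSeries.derivative_pow, map_natCast (PowerSeries.C (R := ℤ)) e]
    calc PowerSeries.mk f * (((e : ℕ) : PowerSeries ℤ) * (PowerSeries.mk f) ^ (e - 1) * (PowerSeries.derivative ℤ) (PowerSeries.mk f))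
        = ((e : ℕ) : PowerSeries ℤ) * ((PowerSeries.derivative ℤ) (PowerSeries.mk f) * (PowerSeries.mk f * (PowerSeries.mk f) ^ (e - 1))) := by ring
      _ = ((e : ℕ) : PowerSeries ℤ) * ((PowerSeries.derivative ℤ) (PowerSeries.mk f) * (PowerSeries.mk f) ^ e) := by rw [hF]
  have hco := congrArg (fun ψ => PowerSeries.coeff n ψ) hmain
  simp only at hco
  rw [PowerSeries.coeff_mul, Finset.Nat.sum_antidiagonal_eq_sum_range_succ_mk,
      PowerSeries.coeff_C_mul, PowerSeries.coeff_mul, Finset.Nat.sum_antidiagonal_eq_sum_range_succ_mk] at hco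
  simp only [PowerSeries.coeff_derivative, PowerSeries.coeff_mk, Nat.succ_eq_add_one] at hco
  have hA : ∑ k ∈ Finset.range (n + 1), f k * (PowerSeries.coeff (n - k + 1) ((PowerSeries.mk f) ^ e) * ((↑(n - k) : ℤ) + 1))
      = (∑ k ∈ Finset.range n, f (k + 1) * PowerSeries.coeff (n - k) ((PowerSeries.mk f) ^ e) * ((n : ℤ) - k))
        + f 0 * PowerSeries.coeff (n + 1) ((PowerSeries.mk f) ^ e) * ((n : ℤ) + 1) := by
    rw [Finset.sum_range_succ']
    congr 1
    · apply Finset.sum_congr rfl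
      intro k hk
      rw [Finset.mem_range] at hk
      rw [show n - (k + 1) + 1 = n - k by omega, show ((↑(n - (k + 1)) : ℤ) + 1) = (n : ℤ) - k by push_cast [Nat.cast_sub] <;> omega]
      ring
    · rw [Nat.sub_zero]
      ring
  have hB : ((e : ℕ) : ℤ) * ∑ k ∈ Finset.range (n + 1), f (k + 1) * ((k : ℤ) + 1) * PowerSeries.coeff (n - k) ((PowerSeries.mk f) ^ e)
      = (e : ℤ) * ∑ k ∈ Finset.range (n + 1), f (k + 1) * PowerSeries.coeff (n - k) ((PowerSeries.mk f) ^ e) * ((k : ℤ) + 1) := by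
    congr 1
    apply Finset.sum_congr rfl
    intro k hk
    ring
  have hT1 : ∑ k ∈ Finset.range (n + 1), f (k + 1) * PowerSeries.coeff (n - k) ((PowerSeries.mk f) ^ e) * ((n : ℤ) - k)
      = ∑ k ∈ Finset.range n, f (k + 1) * PowerSeries.coeff (n - k) ((PowerSeries.mk f) ^ e) * ((n : ℤ) - k) := by
    rw [Finset.sum_range_succ]
    simp
  have htgt : ∑ k ∈ Finset.range (n + 1),
        (((e : ℤ) + 1) * ((k : ℤ) + 1) - ((n : ℤ) + 1)) * f (k + 1) * PowerSeries.coeff (n - k) ((PowerSeries.mk f) ^ e)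
      = (e : ℤ) * (∑ k ∈ Finset.range (n + 1), f (k + 1) * PowerSeries.coeff (n - k) ((PowerSeries.mk f) ^ e) * ((k : ℤ) + 1))
        - ∑ k ∈ Finset.range (n + 1), f (k + 1) * PowerSeries.coeff (n - k) ((PowerSeries.mk f) ^ e) * ((n : ℤ) - k) := by
    rw [Finset.mul_sum, ← Finset.sum_sub_distrib]
    apply Finset.sum_congr rfl
    intro k hk
    ring
  rw [htgt, hT1]
  -- hco : hA-sum = e * hB-ish sum
  rw [hA] at hco
  have hco2 : (∑ k ∈ Finset.range n, f (k + 1) * PowerSeries.coeff (n - k) ((PowerSeries.mk f) ^ e) * ((n : ℤ) - k))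
        + f 0 * PowerSeries.coeff (n + 1) ((PowerSeries.mk f) ^ e) * ((n : ℤ) + 1)
      = (e : ℤ) * ∑ k ∈ Finset.range (n + 1), f (k + 1) * PowerSeries.coeff (n - k) ((PowerSeries.mk f) ^ e) * ((k : ℤ) + 1) := by
    rw [← hB]
    rw [← hco]
  linarith [hco2]

def mstep (a : List Int) (e v c0 : Int) : List Int → Int → List Int := fun b n =>
  PySem.List.pySetD b n (PySem.Int.floordiv
    ((PySem.List.pyRange 1 (n + 1) 1).foldl
      (fun s k => s + ((e + 1) * k - n) * PySem.List.pyGetD a (v + k) 0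
        * PySem.List.pyGetD b (n - k) 0) 0)
    (n * c0))

theorem coeff_zero_pow (φ : PowerSeries ℤ) (k : ℕ) :
    PowerSeries.coeff 0 (φ ^ k) = (PowerSeries.coeff 0 φ) ^ k := by
  simp [PowerSeries.coeff_zero_eq_constantCoeff, map_pow]

theorem sum_map_pyRange_one (g : Int → Int) (n : ℕ) :
    (List.map g (PySem.List.pyRange 1 ((n : Int) + 1) 1)).sum = ∑ t ∈ Finset.range n, g (1 + (t : Int)) := by
  induction n with
  | zero =>
    rw [show ((0:ℕ):Int) + 1 = 1 by simp, PySem.List.pyRange_one_eq_nil (le_refl 1)]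
    simp
  | succ n ih =>
    have h1 : PySem.List.pyRange 1 (((n + 1 : ℕ) : Int) + 1) 1
        = PySem.List.pyRange 1 ((n : Int) + 1) 1 ++ [(n : Int) + 1] := by
      rw [show (((n + 1 : ℕ) : Int) + 1) = ((n : Int) + 1) + 1 by push_cast; ring]
      exact PySem.List.pyRange_one_succ_right (by omega)
    rw [h1, List.map_append, List.sum_append, ih, Finset.sum_range_succ]
    simp only [List.map_cons, List.map_nil, List.sum_cons, List.sum_nil, add_zero]
    rw [show ((n : Int) + 1) = 1 + (n : Int) by ring]

theorem miller_aux (a : List Int) (e : Int) (he : 1 ≤ e) (v M : Int) (hv : 0 ≤ v) (hM : 0 ≤ M)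
    (hc : a.getD v.toNat 0 ≠ 0) (T : ℕ) (hT : (T : Int) ≤ M) :
    ((PySem.List.pyRange 1 ((T : Int) + 1) 1).foldl (mstep a e v (a.getD v.toNat 0))
        (PySem.List.pySetD (List.replicate (M + 1).toNat 0) 0 ((a.getD v.toNat 0) ^ e.toNat))).length
      = (M + 1).toNat ∧
    ∀ i : ℕ, i ≤ T →
      ((PySem.List.pyRange 1 ((T : Int) + 1) 1).foldl (mstep a e v (a.getD v.toNat 0))
        (PySem.List.pySetD (List.replicate (M + 1).toNat 0) 0 ((a.getD v.toNat 0) ^ e.toNat))).getD i 0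
        = PowerSeries.coeff i ((PowerSeries.mk (fun j => a.getD (v.toNat + j) 0)) ^ e.toNat) := by
  have hb0 : PySem.List.pySetD (List.replicate (M + 1).toNat (0:Int)) 0 ((a.getD v.toNat 0) ^ e.toNat)
      = (List.replicate (M + 1).toNat (0:Int)).set 0 ((a.getD v.toNat 0) ^ e.toNat) := by
    rw [PySem.List.pySetD_of_nonneg _ _ (le_refl 0), Int.toNat_zero]
  induction T with
  | zero =>
    rw [show ((0:ℕ):Int) + 1 = 1 by simp, PySem.List.pyRange_one_eq_nil (le_refl 1)]
    simp only [List.foldl_nil, hb0]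
    constructor
    · simp
    · intro i hi
      rw [Nat.le_zero.1 hi, getD_set, if_pos ⟨rfl, by simp; omega⟩, coeff_zero_pow]
      congr 1
      rw [show PowerSeries.coeff 0 (PowerSeries.mk (fun j => a.getD (v.toNat + j) 0))
          = a.getD (v.toNat + 0) 0 from PowerSeries.coeff_mk 0 _, Nat.add_zero]
  | succ T ih =>
    obtain ⟨ihl, ihg⟩ := ih (by omega)
    have hr : PySem.List.pyRange 1 (((T + 1 : ℕ) : Int) + 1) 1
        = PySem.List.pyRange 1 ((T : Int) + 1) 1 ++ [(T : Int) + 1] := by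
      rw [show (((T + 1 : ℕ) : Int) + 1) = ((T : Int) + 1) + 1 by push_cast; ring]
      exact PySem.List.pyRange_one_succ_right (by omega)
    rw [hr, List.foldl_append]
    simp only [List.foldl_cons, List.foldl_nil, mstep]
    rw [foldl_add_eq, zero_add,
      show (T : Int) + 1 + 1 = (((T + 1 : ℕ)) : Int) + 1 by push_cast; ring,
      sum_map_pyRange_one]
    have hsum : ∑ t ∈ Finset.range (T + 1),
        (((e + 1) * (1 + (t : Int)) - ((T : Int) + 1)) * PySem.List.pyGetD a (v + (1 + (t : Int))) 0
          * PySem.List.pyGetD (((PySem.List.pyRange 1 ((T : Int) + 1) 1).foldl (mstep a e v (a.getD v.toNat 0))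
              (PySem.List.pySetD (List.replicate (M + 1).toNat 0) 0 ((a.getD v.toNat 0) ^ e.toNat)))) (((T : Int) + 1) - (1 + (t : Int))) 0)
        = ((T : ℤ) + 1) * (a.getD v.toNat 0) * PowerSeries.coeff (T + 1) ((PowerSeries.mk (fun j => a.getD (v.toNat + j) 0)) ^ e.toNat) := by
      have hmid := miller_id (fun j => a.getD (v.toNat + j) 0) e.toNat (by omega) T
      simp only [Nat.add_zero] at hmid
      rw [hmid]
      apply Finset.sum_congr rfl
      intro t ht
      rw [Finset.mem_range] at ht
      rw [show v + (1 + (t : Int)) = ((v.toNat + (t + 1) : ℕ) : Int) by omega, PySem.List.pyGetD_natCast,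
        show ((T : Int) + 1) - (1 + (t : Int)) = ((T - t : ℕ) : Int) by omega, PySem.List.pyGetD_natCast,
        ihg (T - t) (by omega), show ((e.toNat : ℤ)) = e by omega]
      ring
    constructor
    · rw [PySem.List.pySetD_of_nonneg _ _ (show (0:Int) ≤ (T : Int) + 1 by omega),
        List.length_set, ihl]
    · intro i hi
      have hset : ∀ val : Int, PySem.List.pySetD (((PySem.List.pyRange 1 ((T : Int) + 1) 1).foldl (mstep a e v (a.getD v.toNat 0))
              (PySem.List.pySetD (List.replicate (M + 1).toNat 0) 0 ((a.getD v.toNat 0) ^ e.toNat)))) ((T : Int) + 1) val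
          = (((PySem.List.pyRange 1 ((T : Int) + 1) 1).foldl (mstep a e v (a.getD v.toNat 0))
              (PySem.List.pySetD (List.replicate (M + 1).toNat 0) 0 ((a.getD v.toNat 0) ^ e.toNat)))).set (T + 1) val := by
        intro val
        rw [PySem.List.pySetD_of_nonneg _ _ (show (0:Int) ≤ (T : Int) + 1 by omega),
          show ((T : Int) + 1).toNat = T + 1 by omega]
      rw [hsum, hset, getD_set, ihl]
      have hdiv : PySem.Int.floordiv (((T : ℤ) + 1) * (a.getD v.toNat 0)
            * PowerSeries.coeff (T + 1) ((PowerSeries.mk (fun j => a.getD (v.toNat + j) 0)) ^ e.toNat))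
          (((T : Int) + 1) * (a.getD v.toNat 0))
          = PowerSeries.coeff (T + 1) ((PowerSeries.mk (fun j => a.getD (v.toNat + j) 0)) ^ e.toNat) := by
        exact floordiv_mul_cancel _ _ (mul_ne_zero (by omega : ((T : Int) + 1) ≠ 0) hc)
      rw [hdiv]
      by_cases hieq : T + 1 = i
      · rw [if_pos ⟨hieq, by omega⟩, ← hieq]
      · rw [if_neg (fun h => hieq h.1)]
        exact ihg i (by omega)

theorem miller_rep (a : List Int) (e : Int) (he : 1 ≤ e) (v M : Int)
    (hv : 0 ≤ v) (hM : 0 ≤ M)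
    (hc : a.getD v.toNat 0 ≠ 0) :
    (millerB a e v M (a.getD v.toNat 0)).length = (M + 1).toNat ∧
      ∀ n : ℕ, n < (M + 1).toNat →
        (millerB a e v M (a.getD v.toNat 0)).getD n 0
          = PowerSeries.coeff n ((PowerSeries.mk (fun j => a.getD (v.toNat + j) 0)) ^ e.toNat) := by
  have hmb : millerB a e v M (a.getD v.toNat 0)
      = (PySem.List.pyRange 1 ((M.toNat : Int) + 1) 1).foldl (mstep a e v (a.getD v.toNat 0))
          (PySem.List.pySetD (List.replicate (M + 1).toNat 0) 0 ((a.getD v.toNat 0) ^ e.toNat)) := by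
    show (PySem.List.pyRange 1 (M + 1) 1).foldl (mstep a e v (a.getD v.toNat 0))
          (PySem.List.pySetD (List.replicate (M + 1).toNat 0) 0 ((a.getD v.toNat 0) ^ e.toNat)) = _
    rw [show (M : Int) + 1 = ((M.toNat : Int) + 1) by omega]
  obtain ⟨hl, hg⟩ := miller_aux a e he v M hv hM hc M.toNat (by omega)
  rw [hmb]
  exact ⟨hl, fun n hn => hg n (by omega)⟩

theorem padB_eq (a : List Int) (N : Int) (hN : 0 ≤ N) :
    PySem.List.slice a none (some (N + 1)) ++ List.replicate (N + 1 - (a.length : Int)).toNat 0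
      = ensure_length a N := by
  unfold ensure_length
  rw [PySem.List.slice_to a (show (0:Int) ≤ N + 1 by omega)]
  split_ifs with h1 h2
  · rw [List.take_of_length_le (by omega), (by omega : (N + 1 - (a.length : Int)).toNat = 0)]
    simp
  · rw [List.take_of_length_le (by omega)]
  · rw [(by omega : (N + 1 - (a.length : Int)).toNat = 0)]
    simp


theorem alt_neg_nil (base : List Int) (exponent N : Int) (h0 : 0 ≤ exponent)
    (hne : ¬ exponent = 0) (hN : N < 0) : pow_series_alt base exponent N = [] := by
  rw [pow_series_alt, if_neg (by omega : ¬ exponent < 0), if_neg hne]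
  have hv : findvB (PySem.List.slice base none (some (N + 1))
      ++ List.replicate (N + 1 - (base.length : Int)).toNat 0) N 0 = 0 := by
    rw [findvB, dif_neg (fun h => absurd h.1 (by omega))]
  show (if findvB (PySem.List.slice base none (some (N + 1))
        ++ List.replicate (N + 1 - (base.length : Int)).toNat 0) N 0 * exponent > N
      then List.replicate (N + 1).toNat (0:Int)
      else List.replicate (findvB (PySem.List.slice base none (some (N + 1))
          ++ List.replicate (N + 1 - (base.length : Int)).toNat 0) N 0 * exponent).toNat 0
        ++ millerB (PySem.List.slice base none (some (N + 1))
            ++ List.replicate (N + 1 - (base.length : Int)).toNat 0) exponent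
          (findvB (PySem.List.slice base none (some (N + 1))
            ++ List.replicate (N + 1 - (base.length : Int)).toNat 0) N 0)
          (N - findvB (PySem.List.slice base none (some (N + 1))
            ++ List.replicate (N + 1 - (base.length : Int)).toNat 0) N 0 * exponent)
          (PySem.List.pyGetD (PySem.List.slice base none (some (N + 1))
            ++ List.replicate (N + 1 - (base.length : Int)).toNat 0)
            (findvB (PySem.List.slice base none (some (N + 1))
              ++ List.replicate (N + 1 - (base.length : Int)).toNat 0) N 0) 0)) = []
  rw [hv, if_pos (show (0:Int) * exponent > N by rw [zero_mul]; omega),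
    show (N + 1).toNat = 0 by omega, List.replicate_zero]

theorem getD_replicate_zero (k n : ℕ) : (List.replicate k (0:Int)).getD n 0 = 0 := by
  rcases Nat.lt_or_ge n k with h | h
  · exact List.getD_replicate 0 h
  · exact List.getD_eq_default _ _ (by simpa using h)

-- ===== VERDICT (by name: the statement is the Claim_ definition above) =====
theorem pow_series_spec : Claim_equal_pow_series := by
  intro base exponent N _ hpre
  obtain ⟨he0, hrest⟩ := hpre
  show pow_series base exponent N = pow_series_alt base exponent N
  rcases hrest with hN | ⟨he1, hneg⟩
  case _ =>
    rw [pow_series, pow_series_alt, if_neg (by omega : ¬ exponent < 0), if_neg (by omega : ¬ exponent < 0)]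
    by_cases he : exponent = 0
    · rw [if_pos he, if_pos he, one_series]
    · rw [if_neg he, if_neg he, padB_eq base N hN]
      have hlen : (ensure_length base N).length = (N + 1).toNat := length_ensure base N hN
      have hA : RepL N (if exponent = 1 then ensure_length base N
            else powLoopA N exponent (one_series N) (ensure_length base N))
          ((Fof (ensure_length base N)) ^ exponent.toNat) := by
        by_cases he1 : exponent = 1
        · rw [if_pos he1, he1]
          simpa using rep_self N (ensure_length base N) hlen
        · rw [if_neg he1]
          have h := powLoopA_rep hN exponent he0 (rep_one N hN) (rep_self N (ensure_length base N) hlen)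
          rwa [one_mul] at h
      obtain ⟨hv0, hvN1, hzero, hnz⟩ := findvB_spec (ensure_length base N) N 0 (by omega)
      have hzero' : ∀ k : ℕ, (k : Int) < findvB (ensure_length base N) N 0 →
          (ensure_length base N).getD k 0 = 0 := by
        intro k hk
        have h := hzero (k : Int) (by positivity) hk
        rwa [PySem.List.pyGetD_natCast] at h
      by_cases hvbig : findvB (ensure_length base N) N 0 * exponent > N
      · rw [if_pos hvbig]
        have hrep : RepL N (List.replicate (N + 1).toNat 0) ((Fof (ensure_length base N)) ^ exponent.toNat) := by
          refine ⟨by simp, fun n hn => ?_⟩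
          rw [getD_replicate_zero]
          by_cases hvle : findvB (ensure_length base N) N 0 ≤ N
          · have hsh : Fof (ensure_length base N)
                = PowerSeries.X ^ (findvB (ensure_length base N) N 0).toNat
                  * PowerSeries.mk (fun j => (ensure_length base N).getD ((findvB (ensure_length base N) N 0).toNat + j) 0) :=
              F_shift _ _ (fun k hk => hzero' k (by omega))
            have hcast : (((findvB (ensure_length base N) N 0).toNat * exponent.toNat : ℕ) : Int)
                = findvB (ensure_length base N) N 0 * exponent := by
              rw [Nat.cast_mul, Int.toNat_of_nonneg hv0, Int.toNat_of_nonneg he0]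
            rw [hsh, mul_pow, ← pow_mul, PowerSeries.coeff_X_pow_mul',
              if_neg (by omega : ¬ (findvB (ensure_length base N) N 0).toNat * exponent.toNat ≤ n)]
          · have hF0 : Fof (ensure_length base N) = 0 := by
              apply F_zero
              intro k
              rcases Nat.lt_or_ge k ((N + 1).toNat) with h | h
              · exact hzero' k (by omega)
              · exact List.getD_eq_default _ _ (by omega)
            rw [hF0, zero_pow (by omega : exponent.toNat ≠ 0), map_zero]
        exact rep_unique hA hrep
      · rw [if_neg hvbig]
        have hvle : findvB (ensure_length base N) N 0 ≤ N := by
          by_contra hcon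
          have hveq : findvB (ensure_length base N) N 0 = N + 1 := by omega
          rw [hveq] at hvbig
          nlinarith [mul_le_mul_of_nonneg_left (show (1:ℤ) ≤ exponent by omega) (show (0:ℤ) ≤ N + 1 by omega)]
        have hc : (ensure_length base N).getD (findvB (ensure_length base N) N 0).toNat 0 ≠ 0 := by
          have h := hnz hvle
          have h1 : PySem.List.pyGetD (ensure_length base N) (((findvB (ensure_length base N) N 0).toNat : ℕ) : Int) 0
              = (ensure_length base N).getD (findvB (ensure_length base N) N 0).toNat 0 :=
            PySem.List.pyGetD_natCast _ _ 0
          rw [show (((findvB (ensure_length base N) N 0).toNat : ℕ) : Int) = findvB (ensure_length base N) N 0 by omega] at h1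
          rwa [h1] at h
        have hgetv : PySem.List.pyGetD (ensure_length base N) (findvB (ensure_length base N) N 0) 0
            = (ensure_length base N).getD (findvB (ensure_length base N) N 0).toNat 0 := by
          have h1 := PySem.List.pyGetD_natCast (ensure_length base N) (findvB (ensure_length base N) N 0).toNat (0:Int)
          rwa [show (((findvB (ensure_length base N) N 0).toNat : ℕ) : Int) = findvB (ensure_length base N) N 0 by omega] at h1
        rw [hgetv]
        obtain ⟨hml, hmg⟩ := miller_rep (ensure_length base N) exponent (by omega)
          (findvB (ensure_length base N) N 0) (N - findvB (ensure_length base N) N 0 * exponent)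
          hv0 (by omega) hc
        have hcast : (((findvB (ensure_length base N) N 0).toNat * exponent.toNat : ℕ) : Int)
            = findvB (ensure_length base N) N 0 * exponent := by
          rw [Nat.cast_mul, Int.toNat_of_nonneg hv0, Int.toNat_of_nonneg he0]
        have hcast2 : (findvB (ensure_length base N) N 0 * exponent).toNat
            = (findvB (ensure_length base N) N 0).toNat * exponent.toNat := by
          rw [← hcast, Int.toNat_natCast]
        have hrepB : RepL N (List.replicate (findvB (ensure_length base N) N 0 * exponent).toNat 0
              ++ millerB (ensure_length base N) exponent (findvB (ensure_length base N) N 0)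
                  (N - findvB (ensure_length base N) N 0 * exponent)
                  ((ensure_length base N).getD (findvB (ensure_length base N) N 0).toNat 0))
            ((Fof (ensure_length base N)) ^ exponent.toNat) := by
          have hsh : Fof (ensure_length base N)
              = PowerSeries.X ^ (findvB (ensure_length base N) N 0).toNat
                * PowerSeries.mk (fun j => (ensure_length base N).getD ((findvB (ensure_length base N) N 0).toNat + j) 0) :=
            F_shift _ _ (fun k hk => hzero' k (by omega))
          constructor
          · rw [List.length_append, List.length_replicate, hml]
            omega
          · intro n hn
            rw [hsh, mul_pow, ← pow_mul, PowerSeries.coeff_X_pow_mul']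
            by_cases hnv : n < (findvB (ensure_length base N) N 0 * exponent).toNat
            · rw [List.getD_append _ _ _ _ (by rw [List.length_replicate]; omega), getD_replicate_zero,
                if_neg (show ¬ (findvB (ensure_length base N) N 0).toNat * exponent.toNat ≤ n by rw [← hcast2]; omega)]
            · rw [List.getD_append_right _ _ _ _ (by rw [List.length_replicate]; omega), List.length_replicate,
                hmg (n - (findvB (ensure_length base N) N 0 * exponent).toNat) (by omega),
                if_pos (show (findvB (ensure_length base N) N 0).toNat * exponent.toNat ≤ n by rw [← hcast2]; omega)]
              congr 1
              rw [hcast2]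
        exact rep_unique hA hrepB

  case _ =>
    have hNneg : N < 0 := by rcases hneg with h | h <;> omega
    rw [pow_series, if_neg (by omega : ¬ exponent < 0), if_neg (by omega : ¬ exponent = 0), if_pos he1,
      alt_neg_nil base exponent N he0 (by omega) hNneg]
    unfold ensure_length
    split_ifs with h1 h2
    · exact List.eq_nil_of_length_eq_zero (by omega)
    · omega
    · rcases Int.lt_or_le (N + 1) 0 with hlt | hge
      · rw [show some (N + 1) = some (-(((-(N + 1)).toNat : ℕ) : Int)) by congr 1; omega,
          PySem.List.slice_to_neg_natCast base ((-(N + 1)).toNat) (by omega),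
          show base.length - (-(N + 1)).toNat = 0 by rcases hneg with h | h <;> omega, List.take_zero]
      · rw [PySem.List.slice_to base hge, show (N + 1).toNat = 0 by omega, List.take_zero]
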